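-- pv_equiv track=rewrite | github.com/Wowol/Education | Computer Networks/Modem/DecoderEncoder.py | decodeToNRZ
-- ===== SOURCE A (Python) =====
-- def decodeToNRZ(ramka):
--     output = ''
--     current = '1'
--     for x in ramka:
--         if x == '0':
--             output += current
--         else:
--             if current == '1':
--                 current = '0'
--             else:
--                 current = '1'
--             output += current
--     return output
-- ===== SOURCE B (Python) =====
-- def decodeToNRZ(ramka):
--     # Divide and conquer: _dec(s) decodes s assuming an even number of toggles
--     # has occurred before s, and also returns the toggle parity of s itself.
--     # The right half is decoded independently and its output complemented
--     # when the left half contains an odd number of toggles (non-'0' chars).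
--     _flip = str.maketrans('01', '10')
--
--     def _dec(s):
--         if len(s) == 0:
--             return '', 0
--         if len(s) == 1:
--             return ('1', 0) if s == '0' else ('0', 1)
--         mid = len(s) // 2
--         left, pl = _dec(s[:mid])
--         right, pr = _dec(s[mid:])
--         if pl:
--             right = right.translate(_flip)
--         return left + right, pl ^ pr
--
--     return _dec(ramka)[0]
-- ===== Notes on version B (the rewrite author's own statement) =====
-- stated objective: alternative
-- what changed: Replaced the left-to-right stateful loop by a divide-and-conquer recursion: each half is decoded independently assuming even starting parity, and the right half's output is complemented when the left half holds an odd number of toggles.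
import Mathlib
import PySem

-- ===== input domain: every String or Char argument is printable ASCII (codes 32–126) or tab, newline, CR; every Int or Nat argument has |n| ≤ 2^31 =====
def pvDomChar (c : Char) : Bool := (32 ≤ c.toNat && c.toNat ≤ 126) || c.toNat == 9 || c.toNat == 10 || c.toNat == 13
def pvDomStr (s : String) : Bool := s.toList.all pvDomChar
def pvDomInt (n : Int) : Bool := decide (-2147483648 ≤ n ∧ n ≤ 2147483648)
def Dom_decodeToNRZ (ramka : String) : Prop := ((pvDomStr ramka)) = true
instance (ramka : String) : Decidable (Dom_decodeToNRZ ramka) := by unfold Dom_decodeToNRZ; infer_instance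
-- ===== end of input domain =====

-- B replaces A's left-to-right stateful loop by a divide-and-conquer recursion (decode halves independently, complement the right half on odd left toggle parity); alternative decomposition, return value only.


-- ===== PORT A =====
-- loop over the characters carrying (output, current)
def decodeToNRZ (ramka : String) : String :=
  String.ofList
    (ramka.toList.foldl
      (fun (st : List Char × Char) x =>
        if x = '0' then (st.1 ++ [st.2], st.2)
        else
          let c := if st.2 = '1' then '0' else '1'
          (st.1 ++ [c], c))
      ([], '1')).1

-- ===== PORT B =====
-- str.translate(maketrans('01','10')): '0'↔'1', everything else unchanged
def pvFlip (c : Char) : Char := if c = '0' then '1' else if c = '1' then '0' else c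

-- _dec: decode assuming even toggle parity so far; also return the segment's toggle parity
def pvDec : List Char → List Char × Bool
  | [] => ([], false)
  | [x] => if x = '0' then (['1'], false) else (['0'], true)
  | x :: y :: rest =>
      let s := x :: y :: rest
      let mid := s.length / 2
      let l := pvDec (s.take mid)
      let r := pvDec (s.drop mid)
      (l.1 ++ (if l.2 then r.1.map pvFlip else r.1), xor l.2 r.2)
  termination_by l => l.length
  decreasing_by
    · simp [List.length_take]; omega
    · simp [List.length_drop]; omega

def decodeToNRZ_alt (ramka : String) : String :=
  String.ofList (pvDec ramka.toList).1

-- ===== PRECONDITION & SPEC =====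
def Spec_decodeToNRZ (ramka : String) (out : String) : Prop := out = decodeToNRZ_alt ramka
instance (ramka : String) (out : String) : Decidable (Spec_decodeToNRZ ramka out) := by unfold Spec_decodeToNRZ; infer_instance

-- ===== CLAIM (what is proved, stated in full; the proofs are below) =====
def Claim_equal_decodeToNRZ : Prop := ∀ (ramka : String), Dom_decodeToNRZ ramka → Spec_decodeToNRZ ramka (decodeToNRZ ramka)

-- ===== LEMMAS AND PROOFS =====

-- reference decode: g l p is the decoded output given that p = (odd number of toggles so far)
def pvG : List Char → Bool → List Char
  | [], _ => []
  | x :: xs, p => if x = '0' then (if p then '0' else '1') :: pvG xs p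
                  else (if !p then '0' else '1') :: pvG xs (!p)

-- toggle parity of a segment
def pvPar : List Char → Bool
  | [] => false
  | x :: xs => if x = '0' then pvPar xs else !(pvPar xs)

theorem pvPar_append (a b : List Char) :
    pvPar (a ++ b) = xor (pvPar a) (pvPar b) := by
  induction a with
  | nil => simp [pvPar]
  | cons x xs ih =>
      by_cases hx : x = '0' <;> simp [pvPar, hx, ih]

theorem pvG_append (a b : List Char) (p : Bool) :
    pvG (a ++ b) p = pvG a p ++ pvG b (xor p (pvPar a)) := by
  induction a generalizing p with
  | nil => simp [pvG, pvPar]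
  | cons x xs ih =>
      by_cases hx : x = '0' <;> simp [pvG, pvPar, hx, ih]

theorem pvG_flip (l : List Char) (p : Bool) :
    (pvG l p).map pvFlip = pvG l (!p) := by
  induction l generalizing p with
  | nil => simp [pvG]
  | cons x xs ih =>
      by_cases hx : x = '0' <;> cases p <;> simp [pvG, hx, ih, pvFlip]

theorem pvDec_eq_fuel (n : Nat) (l : List Char) (hl : l.length ≤ n) :
    pvDec l = (pvG l false, pvPar l) := by
  induction n generalizing l with
  | zero =>
      have : l = [] := by cases l <;> simp_all
      subst this; simp [pvDec, pvG, pvPar]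
  | succ n ih =>
      match l with
      | [] => simp [pvDec, pvG, pvPar]
      | [x] => by_cases hx : x = '0' <;> simp [pvDec, pvG, pvPar, hx]
      | x :: y :: rest =>
          rw [pvDec]
          have hlen : (x :: y :: rest).length = rest.length + 2 := by simp
          have htake : ((x :: y :: rest).take ((x :: y :: rest).length / 2)).length ≤ n := by
            simp [List.length_take]; omega
          have hdrop : ((x :: y :: rest).drop ((x :: y :: rest).length / 2)).length ≤ n := by
            simp [List.length_drop]; omega
          rw [ih _ htake, ih _ hdrop]
          have hsplit : (x :: y :: rest).take ((x :: y :: rest).length / 2)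
              ++ (x :: y :: rest).drop ((x :: y :: rest).length / 2) = x :: y :: rest :=
            List.take_append_drop _ _
          dsimp only
          rw [Prod.mk.injEq]
          constructor
          · by_cases hp : pvPar ((x :: y :: rest).take ((x :: y :: rest).length / 2))
            · simp only [hp, if_true, pvG_flip]
              conv_rhs => rw [← hsplit, pvG_append]
              simp only [List.length_cons] at hp
              simp [hp]
            · simp only [hp]
              conv_rhs => rw [← hsplit, pvG_append]
              rw [Bool.not_eq_true] at hp
              simp only [List.length_cons] at hp
              simp [hp]
          · conv_rhs => rw [← hsplit, pvPar_append]

theorem pvDec_eq (l : List Char) : pvDec l = (pvG l false, pvPar l) :=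
  pvDec_eq_fuel l.length l le_rfl

-- A's fold equals the reference decode (current = if p then '0' else '1')
theorem pvFoldA (l : List Char) (acc : List Char) (p : Bool) :
    (l.foldl
      (fun (st : List Char × Char) x =>
        if x = '0' then (st.1 ++ [st.2], st.2)
        else
          let c := if st.2 = '1' then '0' else '1'
          (st.1 ++ [c], c))
      (acc, if p then '0' else '1')).1 = acc ++ pvG l p := by
  induction l generalizing acc p with
  | nil => simp [pvG]
  | cons x xs ih =>
      by_cases hx : x = '0'
      · simp only [List.foldl, hx, if_true]
        rw [ih (acc ++ [if p then '0' else '1']) p]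
        simp [pvG]
      · have hc : (if (if p then '0' else '1') = '1' then '0' else '1')
            = (if !p then '0' else '1') := by cases p <;> simp
        simp only [List.foldl, hx, if_false, hc]
        rw [ih (acc ++ [if !p then '0' else '1']) (!p)]
        simp [pvG, hx]

-- ===== VERDICT (by name: the statement is the Claim_ definition above) =====
theorem decodeToNRZ_spec : Claim_equal_decodeToNRZ := by
  intro ramka _
  have hA := pvFoldA ramka.toList [] false
  norm_num at hA
  simp only [Spec_decodeToNRZ, decodeToNRZ, decodeToNRZ_alt, hA, pvDec_eq]
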